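-- pv_equiv track=rewrite | github.com/karthiksai2000/mama-care | ai_services/diet_service.py | normalize_activity_input
-- ===== SOURCE A (Python) =====
-- ACTIVITY_LEVELS = ["Sedentary", "Light", "Moderate", "Active"]
--
-- def normalize_activity_input(value):
--     if value is None:
--         return None
--     text = str(value).strip().lower()
--     for activity in ACTIVITY_LEVELS:
--         if text == activity.lower() or text == activity.lower().replace("-", " "):
--             return activity
--     if text.startswith("s"):
--         return "Sedentary"
--     if text.startswith("l"):
--         return "Light"
--     if text.startswith("m"):
--         return "Moderate"
--     if text.startswith("a"):
--         return "Active"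
--     return None
-- ===== SOURCE B (Python) =====
-- def normalize_activity_input(value):
--     if value is None:
--         return None
--     text = str(value).strip().lower()
--     return {"s": "Sedentary", "l": "Light", "m": "Moderate", "a": "Active"}.get(text[:1])
-- ===== Notes on version B (the rewrite author's own statement) =====
-- stated objective: simpler
-- what changed: Drops A's exact-match loop over ACTIVITY_LEVELS (redundant, since every canonical label is already selected by its first letter and contains no hyphen) and replaces the whole startswith chain by a single first-character dict lookup on text[:1].
import Mathlib
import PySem

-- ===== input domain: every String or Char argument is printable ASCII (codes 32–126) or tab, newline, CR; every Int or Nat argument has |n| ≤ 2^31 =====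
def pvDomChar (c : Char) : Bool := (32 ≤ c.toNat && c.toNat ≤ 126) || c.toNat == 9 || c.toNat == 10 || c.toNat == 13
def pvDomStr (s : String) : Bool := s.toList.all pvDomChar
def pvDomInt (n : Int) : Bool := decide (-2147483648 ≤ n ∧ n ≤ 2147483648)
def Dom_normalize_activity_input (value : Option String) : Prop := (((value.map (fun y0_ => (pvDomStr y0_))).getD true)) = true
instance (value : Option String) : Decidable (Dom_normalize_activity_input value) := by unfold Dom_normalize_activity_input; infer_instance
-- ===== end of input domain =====

-- B drops A's exact-match loop (redundant: each label is picked by its first letter) and replaces the startswith chain with one first-character dict lookup; objective: simpler.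


-- ===== PORT A =====
def ACTIVITY_LEVELS : List String := ["Sedentary", "Light", "Moderate", "Active"]

-- the 'for activity in ACTIVITY_LEVELS' loop of A (some = early return on an exact match)
def pvLoopA (text : String) : List String → Option String
  | [] => none
  | activity :: rest =>
    if text == PySem.Str.lower activity
        || text == PySem.Str.replace (PySem.Str.lower activity) "-" " " then some activity
    else pvLoopA text rest

-- A's body after the None guard, applied to text = str(value).strip().lower()
def pvBodyA (text : String) : Option String :=
  match pvLoopA text ACTIVITY_LEVELS with
  | some r => some r
  | none =>
    if PySem.Str.startswith text "s" then some "Sedentary"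
    else if PySem.Str.startswith text "l" then some "Light"
    else if PySem.Str.startswith text "m" then some "Moderate"
    else if PySem.Str.startswith text "a" then some "Active"
    else none

def normalize_activity_input (value : Option String) : Option String :=
  match value with
  | none => none
  | some v => pvBodyA (PySem.Str.lower (PySem.Str.strip v))

-- ===== PORT B =====
-- B's body after the None guard: {"s": …, …}.get(text[:1])
def pvBodyB (text : String) : Option String :=
  PySem.Dict.get?
    (PySem.Dict.ofList [("s", "Sedentary"), ("l", "Light"), ("m", "Moderate"), ("a", "Active")])
    (PySem.Str.slice text none (some 1))

def normalize_activity_input_alt (value : Option String) : Option String :=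
  match value with
  | none => none
  | some v => pvBodyB (PySem.Str.lower (PySem.Str.strip v))

-- ===== PRECONDITION & SPEC =====
def Spec_normalize_activity_input (value : Option String) (out : Option String) : Prop := out = normalize_activity_input_alt value
instance (value : Option String) (out : Option String) : Decidable (Spec_normalize_activity_input value out) := by unfold Spec_normalize_activity_input; infer_instance

-- ===== CLAIM (what is proved, stated in full; the proofs are below) =====
def Claim_equal_normalize_activity_input : Prop := ∀ (value : Option String), Dom_normalize_activity_input value → Spec_normalize_activity_input value (normalize_activity_input value)

-- ===== LEMMAS AND PROOFS =====

theorem pv_keybeq (a c : Char) : (String.ofList [a] == String.ofList [c]) = (c == a) := by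
  by_cases h : c = a
  · subst h; simp
  · have hne : ¬ String.ofList [a] = String.ofList [c] := by
      rw [String.ofList_inj]
      intro hh; exact h (List.cons.inj hh).1.symm
    simp [hne, h]

theorem pv_sw (p c : Char) (cs : List Char) :
    PySem.Str.startswith (String.ofList (c :: cs)) (String.ofList [p]) = (c == p) := by
  simp [pysem, PySem.Chars.startswith, List.isPrefixOf]
  by_cases h : c = p
  · simp [h]
  · simp [h]; exact fun hh => h hh.symm

theorem pv_sl (c : Char) (cs : List Char) :
    PySem.Str.slice (String.ofList (c :: cs)) none (some 1) = String.ofList [c] := by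
  simp [pysem, PySem.Str.slice, PySem.List.slice_to]

theorem pv_kb_s (c : Char) : (("s" : String) == String.ofList [c]) = (c == 's') := by
  rw [show ("s" : String) = String.ofList ['s'] from by decide]; exact pv_keybeq 's' c

theorem pv_kb_l (c : Char) : (("l" : String) == String.ofList [c]) = (c == 'l') := by
  rw [show ("l" : String) = String.ofList ['l'] from by decide]; exact pv_keybeq 'l' c

theorem pv_kb_m (c : Char) : (("m" : String) == String.ofList [c]) = (c == 'm') := by
  rw [show ("m" : String) = String.ofList ['m'] from by decide]; exact pv_keybeq 'm' c

theorem pv_kb_a (c : Char) : (("a" : String) == String.ofList [c]) = (c == 'a') := by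
  rw [show ("a" : String) = String.ofList ['a'] from by decide]; exact pv_keybeq 'a' c

theorem pv_dget (c : Char) :
    PySem.Dict.get?
      (PySem.Dict.ofList [("s", "Sedentary"), ("l", "Light"), ("m", "Moderate"), ("a", "Active")])
      (String.ofList [c]) =
    (if c == 's' then some "Sedentary"
     else if c == 'l' then some "Light"
     else if c == 'm' then some "Moderate"
     else if c == 'a' then some "Active"
     else none) := by
  rw [show PySem.Dict.ofList [("s", ("Sedentary" : String)), ("l", "Light"), ("m", "Moderate"), ("a", "Active")]
        = PySem.Dict.mk [("s", "Sedentary"), ("l", "Light"), ("m", "Moderate"), ("a", "Active")] from by decide,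
      show ("s" : String) = String.ofList ['s'] from by decide,
      show ("l" : String) = String.ofList ['l'] from by decide,
      show ("m" : String) = String.ofList ['m'] from by decide,
      show ("a" : String) = String.ofList ['a'] from by decide]
  simp only [PySem.Dict.get?, List.find?]
  rw [pv_kb_s c, pv_kb_l c, pv_kb_m c, pv_kb_a c]
  by_cases h1 : c = 's' <;> by_cases h2 : c = 'l' <;> by_cases h3 : c = 'm' <;> by_cases h4 : c = 'a' <;>
    first
      | (rw [beq_eq_false_iff_ne.mpr h1, beq_eq_false_iff_ne.mpr h2,
             beq_eq_false_iff_ne.mpr h3, beq_eq_false_iff_ne.mpr h4]; rfl)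
      | simp [h1, h2, h3, h4]

theorem pv_core (t : String) : pvBodyA t = pvBodyB t := by
  by_cases h1 : t = "sedentary"; · subst h1; decide
  by_cases h2 : t = "light"; · subst h2; decide
  by_cases h3 : t = "moderate"; · subst h3; decide
  by_cases h4 : t = "active"; · subst h4; decide
  have hl : pvLoopA t ACTIVITY_LEVELS = none := by
    simp [pvLoopA, ACTIVITY_LEVELS,
      show PySem.Str.lower "Sedentary" = "sedentary" from by decide,
      show PySem.Str.replace "sedentary" "-" " " = "sedentary" from by decide,
      show PySem.Str.lower "Light" = "light" from by decide,
      show PySem.Str.replace "light" "-" " " = "light" from by decide,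
      show PySem.Str.lower "Moderate" = "moderate" from by decide,
      show PySem.Str.replace "moderate" "-" " " = "moderate" from by decide,
      show PySem.Str.lower "Active" = "active" from by decide,
      show PySem.Str.replace "active" "-" " " = "active" from by decide,
      h1, h2, h3, h4]
  unfold pvBodyA pvBodyB
  rw [hl]
  rw [show t = String.ofList t.toList from String.ofList_toList.symm]
  cases t.toList with
  | nil => decide
  | cons c cs =>
    rw [show ("s" : String) = String.ofList ['s'] from by decide,
        show ("l" : String) = String.ofList ['l'] from by decide,
        show ("m" : String) = String.ofList ['m'] from by decide,
        show ("a" : String) = String.ofList ['a'] from by decide]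
    rw [pv_sw 's' c cs, pv_sw 'l' c cs, pv_sw 'm' c cs, pv_sw 'a' c cs, pv_sl c cs, pv_dget c]

-- ===== VERDICT (by name: the statement is the Claim_ definition above) =====
theorem normalize_activity_input_spec : Claim_equal_normalize_activity_input := by
  intro value _
  unfold Spec_normalize_activity_input normalize_activity_input normalize_activity_input_alt
  cases value with
  | none => rfl
  | some v => exact pv_core _
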